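-- pv_equiv track=rewrite | github.com/epilectrik/voynich | phases/HAZARD_VIOLATION_ARCHAEOLOGY/scripts/hazard_violation_archaeology.py | folio_to_section
-- ===== SOURCE A (Python) =====
-- def folio_to_section(folio):
--     num = int(''.join(c for c in folio if c.isdigit())[:3])
--     if num <= 25:    return 'HERBAL_A'
--     elif num <= 56:  return 'HERBAL_B'
--     elif num <= 67:  return 'PHARMA'
--     elif num <= 73:  return 'ASTRO'
--     elif num <= 84:  return 'BIO'
--     elif num <= 86:  return 'COSMO'
--     elif num <= 102: return 'RECIPE_A'
--     else:            return 'RECIPE_B'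
-- ===== SOURCE B (Python) =====
-- _BOUNDARIES = [25, 56, 67, 73, 84, 86, 102]
-- _NAMES = ['HERBAL_A', 'HERBAL_B', 'PHARMA', 'ASTRO', 'BIO', 'COSMO', 'RECIPE_A', 'RECIPE_B']
--
--
-- def _bisect_left(a, x):
--     lo, hi = 0, len(a)
--     while lo < hi:
--         mid = (lo + hi) // 2
--         if a[mid] < x:
--             lo = mid + 1
--         else:
--             hi = mid
--     return lo
--
--
-- def folio_to_section(folio):
--     num = int(''.join(c for c in folio if c.isdigit())[:3])
--     return _NAMES[_bisect_left(_BOUNDARIES, num)]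
-- ===== Notes on version B (the rewrite author's own statement) =====
-- stated objective: idiomatic
-- what changed: The if-elif threshold chain is replaced by a precomputed sorted boundary table with a hand-written bisect_left binary search indexing a parallel names list.
import Mathlib
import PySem

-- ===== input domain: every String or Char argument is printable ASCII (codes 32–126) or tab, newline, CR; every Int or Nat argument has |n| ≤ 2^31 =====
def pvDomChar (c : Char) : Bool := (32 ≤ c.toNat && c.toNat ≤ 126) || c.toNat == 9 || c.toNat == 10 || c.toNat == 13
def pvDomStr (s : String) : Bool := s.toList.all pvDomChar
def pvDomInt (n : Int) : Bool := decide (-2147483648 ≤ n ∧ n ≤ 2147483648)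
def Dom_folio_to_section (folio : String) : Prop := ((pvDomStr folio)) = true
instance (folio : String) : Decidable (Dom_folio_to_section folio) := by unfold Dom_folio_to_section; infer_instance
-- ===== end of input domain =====

-- B replaces A's if-elif threshold chain by a bisect_left binary search over a sorted boundary table with a parallel names list (idiomatic table-driven form, same cost class).


-- ===== PORT A =====
-- num = int of the joined digit characters, truncated to 3; none = ValueError (no digit in folio), excluded by Pre_
def pvFolioNum? (folio : String) : Option Int :=
  PySem.Int.ofChars? (PySem.List.slice (folio.toList.filter PySem.Chars.isdigit) none (some 3))

def folio_to_section (folio : String) : String :=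
  match pvFolioNum? folio with
  | none => ""   -- unreachable under Pre_: Python raises ValueError when no digit is found
  | some num =>
    if num ≤ 25 then "HERBAL_A"
    else if num ≤ 56 then "HERBAL_B"
    else if num ≤ 67 then "PHARMA"
    else if num ≤ 73 then "ASTRO"
    else if num ≤ 84 then "BIO"
    else if num ≤ 86 then "COSMO"
    else if num ≤ 102 then "RECIPE_A"
    else "RECIPE_B"

-- ===== PORT B =====
def pvBoundaries : List Int := [25, 56, 67, 73, 84, 86, 102]
def pvNames : List String :=
  ["HERBAL_A", "HERBAL_B", "PHARMA", "ASTRO", "BIO", "COSMO", "RECIPE_A", "RECIPE_B"]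

-- hand-written bisect_left loop of Source B (while lo < hi: …), recursion on hi - lo
def pvBisectLeft (a : List Int) (x : Int) (lo hi : Nat) : Nat :=
  if lo < hi then
    let mid := (lo + hi) / 2
    if a.getD mid 0 < x then pvBisectLeft a x (mid + 1) hi
    else pvBisectLeft a x lo mid
  else lo
termination_by hi - lo
decreasing_by all_goals omega

def folio_to_section_alt (folio : String) : String :=
  match pvFolioNum? folio with
  | none => ""   -- unreachable under Pre_: Python raises ValueError when no digit is found
  | some num => pvNames.getD (pvBisectLeft pvBoundaries num 0 pvBoundaries.length) ""

-- ===== PRECONDITION & SPEC =====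
-- Pre_ excludes exactly the strings containing no digit character, on which Python's int conversion raises ValueError in both A and B.
def Pre_folio_to_section (folio : String) : Prop :=
  folio.toList.any PySem.Chars.isdigit = true
instance (folio : String) : Decidable (Pre_folio_to_section folio) := by
  unfold Pre_folio_to_section; infer_instance

def pvWitness_folio_to_section : String := "f68r"

def Spec_folio_to_section (folio : String) (out : String) : Prop := out = folio_to_section_alt folio
instance (folio : String) (out : String) : Decidable (Spec_folio_to_section folio out) := by unfold Spec_folio_to_section; infer_instance

-- ===== CLAIM (what is proved, stated in full; the proofs are below) =====
def Claim_equal_folio_to_section : Prop := ∀ (folio : String), Dom_folio_to_section folio → Pre_folio_to_section folio → Spec_folio_to_section folio (folio_to_section folio)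

-- ===== LEMMAS AND PROOFS =====
-- the binary search over the concrete table agrees with the if-elif chain for every num
theorem pvTable_eq (num : Int) :
    pvNames.getD (pvBisectLeft pvBoundaries num 0 pvBoundaries.length) "" =
      (if num ≤ 25 then "HERBAL_A"
       else if num ≤ 56 then "HERBAL_B"
       else if num ≤ 67 then "PHARMA"
       else if num ≤ 73 then "ASTRO"
       else if num ≤ 84 then "BIO"
       else if num ≤ 86 then "COSMO"
       else if num ≤ 102 then "RECIPE_A"
       else "RECIPE_B") := by
  simp only [pvBoundaries, pvNames, List.length_cons, List.length_nil]
  simp [pvBisectLeft, List.getD]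
  split_ifs <;> simp_all <;> omega

-- ===== VERDICT (by name: the statement is the Claim_ definition above) =====
theorem folio_to_section_spec : Claim_equal_folio_to_section := by
  intro folio _ _
  unfold Spec_folio_to_section folio_to_section folio_to_section_alt
  cases pvFolioNum? folio with
  | none => rfl
  | some num => exact (pvTable_eq num).symm
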